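-- pv_equiv track=rewrite | github.com/nj-vs-vh/sphere-telemetry-processing | height_correction/correction.py | find_adjasent_interval
-- ===== SOURCE A (Python) =====
-- from math import copysign
--
-- def find_adjasent_interval(direction, window, mask, istart):
--     def window_limits(i):
--         if direction > 0:
--             start = i
--             end = min(i + window, len(mask))
--         else:
--             start = max(i - window + 1, 0)
--             end = i + 1
--         return start, end
--
--     def get_window(i):
--         start, end = window_limits(i)
--         return mask[start:end]
--
--     def on_edge(i):
--         if direction > 0:
--             return i == len(mask) - 1
--         else:
--             return i == 0
--
--     i = istart
--     while any(get_window(i)) and not on_edge(i):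
--         i = int(i + copysign(1, direction))
--
--     return window_limits(i)
-- ===== SOURCE B (Python) =====
-- def find_adjasent_interval(direction, window, mask, istart):
--     n = len(mask)
--     # prefix[k] = number of flagged entries among mask[:k]
--     prefix = [0]
--     for m in mask:
--         prefix.append(prefix[-1] + (1 if m else 0))
--
--     def limits(i):
--         if direction > 0:
--             return i, min(i + window, n)
--         return max(i - window + 1, 0), i + 1
--
--     def window_has_flag(i):
--         a, b = limits(i)
--         a, b = max(a, 0), min(b, n)
--         return a < b and prefix[b] - prefix[a] > 0
--
--     edge = n - 1 if direction > 0 else 0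
--     step = 1 if direction > 0 else -1
--     i = istart
--     while window_has_flag(i) and i != edge:
--         i += step
--     return limits(i)
-- ===== Notes on version B (the rewrite author's own statement) =====
-- stated objective: faster
-- what changed: B precomputes a prefix-sum array of the mask once and answers each window-emptiness question with one O(1) prefix difference instead of A's materialising and scanning a slice of up to `window` elements at every loop step; Pre_ restricts to the function's natural domain (direction != 0, 0 <= istart, and 0 <= window when direction > 0), outside of which A's value rests on Python's accidental negative-slice wraparound or on copysign(1, 0) = +1.
-- outside the precondition, e.g. on find_adjasent_interval(0, 1, [False, True, False], 1): A returns (2, 3), B returns (0, 1); on find_adjasent_interval(1, -1, [True, True, True], 0): A returns (1, 0), B returns (0, -1); on find_adjasent_interval(1, 2, [True, False, True], -1): A returns (-1, 1), B returns (2, 3)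
import Mathlib
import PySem

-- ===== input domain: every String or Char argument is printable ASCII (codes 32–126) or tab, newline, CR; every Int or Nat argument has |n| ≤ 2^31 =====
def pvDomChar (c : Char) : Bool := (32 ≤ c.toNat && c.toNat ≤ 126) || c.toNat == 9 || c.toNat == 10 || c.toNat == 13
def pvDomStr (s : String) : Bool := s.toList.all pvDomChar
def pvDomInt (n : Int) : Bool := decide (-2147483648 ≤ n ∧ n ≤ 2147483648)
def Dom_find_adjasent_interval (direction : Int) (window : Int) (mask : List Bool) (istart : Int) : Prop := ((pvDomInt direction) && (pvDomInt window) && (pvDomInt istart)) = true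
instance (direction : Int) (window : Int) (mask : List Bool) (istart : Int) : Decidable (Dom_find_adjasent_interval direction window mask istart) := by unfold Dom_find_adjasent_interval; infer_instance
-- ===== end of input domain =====

-- B replaces A's per-step slice-and-scan window-emptiness test by a prefix-sum array queried in O(1) per step; objective: faster (asymptotic).

-- ===== PORT A =====
-- window_limits(i)
def pvA_limits (direction window : Int) (mask : List Bool) (i : Int) : Int × Int :=
  if direction > 0 then (i, min (i + window) (PySem.List.len mask))
  else (max (i - window + 1) 0, i + 1)

-- get_window(i) = mask[start:end]
def pvA_getwin (direction window : Int) (mask : List Bool) (i : Int) : List Bool :=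
  PySem.List.slice mask (some (pvA_limits direction window mask i).1) (some (pvA_limits direction window mask i).2)

-- on_edge(i)
def pvA_edge (direction : Int) (mask : List Bool) (i : Int) : Bool :=
  if direction > 0 then i == PySem.List.len mask - 1 else i == 0

-- the while loop; fuel is ONLY a totality guard (the bound passed below exceeds the number of
-- iterations the Python loop ever performs on the inputs admitted by Pre_).
-- int(i + copysign(1, direction)) = i+1 if direction ≥ 0 else i-1 (exact: |i| stays far below 2^53 here)
def pvA_loop (direction window : Int) (mask : List Bool) : Nat → Int → Int
  | 0, i => i
  | fuel+1, i =>
    if (pvA_getwin direction window mask i).any id && !(pvA_edge direction mask i) then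
      pvA_loop direction window mask fuel (i + (if direction ≥ 0 then 1 else -1))
    else i

def find_adjasent_interval (direction : Int) (window : Int) (mask : List Bool) (istart : Int) : List Int :=
  let i := pvA_loop direction window mask (mask.length + window.natAbs + istart.natAbs + 2) istart
  [(pvA_limits direction window mask i).1, (pvA_limits direction window mask i).2]

-- ===== PORT B =====
-- prefix[k] = number of flagged entries among mask[:k], built once
def pvB_prefix (mask : List Bool) : List Int :=
  mask.foldl (fun acc m => acc ++ [PySem.List.pyGetD acc (-1) 0 + (if m then 1 else 0)]) [0]

-- limits(i)
def pvB_limits (direction window n : Int) (i : Int) : Int × Int :=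
  if direction > 0 then (i, min (i + window) n) else (max (i - window + 1) 0, i + 1)

-- window_has_flag(i): O(1) prefix-sum query instead of scanning the slice
def pvB_nonempty (direction window n : Int) (pref : List Int) (i : Int) : Bool :=
  let a := max (pvB_limits direction window n i).1 0
  let b := min (pvB_limits direction window n i).2 n
  decide (a < b) && decide (PySem.List.pyGetD pref b 0 - PySem.List.pyGetD pref a 0 > 0)

-- the while loop (same totality-guard fuel as Port A)
def pvB_loop (direction window n : Int) (pref : List Int) (edge step : Int) : Nat → Int → Int
  | 0, i => i
  | fuel+1, i =>
    if pvB_nonempty direction window n pref i && !(i == edge) then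
      pvB_loop direction window n pref edge step fuel (i + step)
    else i

def find_adjasent_interval_alt (direction : Int) (window : Int) (mask : List Bool) (istart : Int) : List Int :=
  let n := PySem.List.len mask
  let pref := pvB_prefix mask
  let edge : Int := if direction > 0 then n - 1 else 0
  let step : Int := if direction > 0 then 1 else -1
  let i := pvB_loop direction window n pref edge step (mask.length + window.natAbs + istart.natAbs + 2) istart
  [(pvB_limits direction window n i).1, (pvB_limits direction window n i).2]

-- ===== PRECONDITION & SPEC =====
-- Pre_ restricts to the function's natural domain: a nonzero direction, a nonnegative start
-- index, and (for a forward direction, where the window's upper bound is istart + window) a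
-- nonnegative window. Outside it A still returns, but its value rests on Python's accidental
-- negative-slice wraparound (istart < 0, or window < 0 with direction > 0) or on
-- copysign(1, 0) = +1 (direction = 0); B does the natural thing there instead.
def Pre_find_adjasent_interval (direction : Int) (window : Int) (mask : List Bool) (istart : Int) : Prop :=
  direction ≠ 0 ∧ 0 ≤ istart ∧ (0 < direction → 0 ≤ window)
instance (direction : Int) (window : Int) (mask : List Bool) (istart : Int) : Decidable (Pre_find_adjasent_interval direction window mask istart) := by unfold Pre_find_adjasent_interval; infer_instance
def pvWitness_find_adjasent_interval : Int × Int × List Bool × Int := (1, 2, [false, true, false], 0)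

def Spec_find_adjasent_interval (direction : Int) (window : Int) (mask : List Bool) (istart : Int) (out : List Int) : Prop := out = find_adjasent_interval_alt direction window mask istart
instance (direction : Int) (window : Int) (mask : List Bool) (istart : Int) (out : List Int) : Decidable (Spec_find_adjasent_interval direction window mask istart out) := by unfold Spec_find_adjasent_interval; infer_instance

-- ===== CLAIM (what is proved, stated in full; the proofs are below) =====
def Claim_equal_find_adjasent_interval : Prop := ∀ (direction : Int) (window : Int) (mask : List Bool) (istart : Int), Dom_find_adjasent_interval direction window mask istart → Pre_find_adjasent_interval direction window mask istart → Spec_find_adjasent_interval direction window mask istart (find_adjasent_interval direction window mask istart)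

-- ===== LEMMAS AND PROOFS =====

-- running partial counts of a boolean list, starting from s (proof-only helper)
def pvP (s : Int) : List Bool → List Int
  | [] => []
  | m :: ms => (s + if m then 1 else 0) :: pvP (s + if m then 1 else 0) ms

theorem pvB_prefix_foldl (ms : List Bool) : ∀ acc : List Int,
    ms.foldl (fun acc m => acc ++ [PySem.List.pyGetD acc (-1) 0 + (if m then 1 else 0)]) acc
      = acc ++ pvP (PySem.List.pyGetD acc (-1) 0) ms := by
  induction ms with
  | nil => intro acc; simp [pvP]
  | cons m ms ih =>
    intro acc
    simp only [List.foldl_cons, pvP]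
    rw [ih, PySem.List.pyGetD_neg_one_append_singleton, List.append_assoc]
    rfl

theorem pvB_prefix_eq (mask : List Bool) : pvB_prefix mask = 0 :: pvP 0 mask := by
  unfold pvB_prefix
  rw [pvB_prefix_foldl]
  have h0 : PySem.List.pyGetD ([0] : List Int) (-1) 0 = 0 := by decide
  rw [h0]
  rfl

theorem pvP_getD (ms : List Bool) : ∀ (s : Int) (k : Nat), k ≤ ms.length →
    (s :: pvP s ms).getD k 0 = s + ((ms.take k).countP id : Int) := by
  induction ms with
  | nil =>
    intro s k hk
    have hk0 : k = 0 := by simp at hk; omega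
    subst hk0
    simp
  | cons m ms ih =>
    intro s k hk
    cases k with
    | zero => simp
    | succ k' =>
      simp only [pvP, List.getD_cons_succ, List.take_succ_cons, List.countP_cons]
      rw [ih _ k' (by simpa using hk)]
      cases m <;> simp [id] <;> ring

-- clampIdx of a nonnegative index is min with the length
theorem pv_clamp_nonneg (n : Nat) (x : Int) (hx : 0 ≤ x) :
    ((PySem.List.clampIdx n x : Nat) : Int) = min x n := by
  simp only [PySem.List.clampIdx]
  split_ifs <;> omega

theorem count_take_sub (mask : List Bool) (a b : Nat) (hab : a ≤ b) :
    ((mask.drop a).take (b - a)).countP id = (mask.take b).countP id - (mask.take a).countP id := by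
  have h : mask.take b = mask.take a ++ (mask.drop a).take (b - a) := by
    rw [← List.take_add]
    congr 1
    omega
  rw [h, List.countP_append]
  omega

theorem any_eq_countP_pos (l : List Bool) : l.any id = decide (0 < l.countP id) := by
  cases h : l.any id
  · simp only [List.any_eq_false] at h
    have : l.countP id = 0 := by
      rw [List.countP_eq_zero]
      intro a ha
      simpa using h a ha
    simp [this]
  · rw [List.any_eq_true] at h
    obtain ⟨x, hx, hid⟩ := h
    have : 0 < l.countP id := List.countP_pos_iff.mpr ⟨x, hx, hid⟩
    simp [this]

-- slice via clamped bounds (its definition)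
theorem slice_clamp (mask : List Bool) (a b : Int) :
    PySem.List.slice mask (some a) (some b)
      = (mask.drop (PySem.List.clampIdx mask.length a)).take
          (PySem.List.clampIdx mask.length b - PySem.List.clampIdx mask.length a) := by
  simp [PySem.List.slice]

-- the heart: for nonnegative bounds, scanning the slice equals the prefix-sum test
theorem pv_key (mask : List Bool) (a b : Int) (ha : 0 ≤ a) (hb : 0 ≤ b) :
    (PySem.List.slice mask (some a) (some b)).any id
      = (decide (max a 0 < min b (PySem.List.len mask)) &&
         decide (PySem.List.pyGetD (pvB_prefix mask) (min b (PySem.List.len mask)) 0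
               - PySem.List.pyGetD (pvB_prefix mask) (max a 0) 0 > 0)) := by
  have hmax : max a 0 = a := by omega
  rw [hmax]
  have hlen : PySem.List.len mask = (mask.length : Int) := PySem.List.len_eq mask
  set A := PySem.List.clampIdx mask.length a with hA
  set B := PySem.List.clampIdx mask.length b with hB
  have hAc : ((A : Nat) : Int) = min a mask.length := pv_clamp_nonneg mask.length a ha
  have hBc : ((B : Nat) : Int) = min b mask.length := pv_clamp_nonneg mask.length b hb
  have hAle : A ≤ mask.length := by omega
  have hBle : B ≤ mask.length := by omega
  have hminb : min b (PySem.List.len mask) = ((B : Nat) : Int) := by rw [hlen, hBc]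
  rw [hminb, slice_clamp, ← hA, ← hB]
  by_cases hle : a ≤ (mask.length : Int)
  · have haA : a = ((A : Nat) : Int) := by omega
    rw [haA]
    rw [PySem.List.pyGetD_natCast, PySem.List.pyGetD_natCast]
    rw [pvB_prefix_eq, pvP_getD mask 0 A hAle, pvP_getD mask 0 B hBle]
    by_cases hab : A < B
    · have hlt : ((A : Int) < (B : Int)) := by exact_mod_cast hab
      rw [any_eq_countP_pos, count_take_sub mask A B (le_of_lt hab)]
      have htake : mask.take B = mask.take A ++ (mask.drop A).take (B - A) := by
        rw [← List.take_add]
        congr 1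
        omega
      have hcnt : (mask.take A).countP id ≤ (mask.take B).countP id := by
        rw [htake, List.countP_append]
        omega
      have : (decide ((A : Int) < (B : Int))) = true := by simpa using hlt
      rw [this, Bool.true_and]
      simp only [decide_eq_decide]
      omega
    · have hge : ¬ ((A : Int) < (B : Int)) := by exact_mod_cast hab
      have hBA : B - A = 0 := by omega
      have : (decide ((A : Int) < (B : Int))) = false := by simpa using hge
      rw [this, Bool.false_and, hBA]
      simp
  · -- a > len: window starts past the end, both sides are false
    have hAn : A = mask.length := by omega
    have hfalse : (decide (a < ((B : Nat) : Int))) = false := by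
      simp only [decide_eq_false_iff_not]
      omega
    rw [hfalse, Bool.false_and]
    have hBA : B - A = 0 := by omega
    rw [hBA]
    simp

-- A's slice-scan test equals B's prefix-sum test at every nonnegative position
theorem pv_test_eq (direction window : Int) (mask : List Bool) (i : Int)
    (hw : 0 < direction → 0 ≤ window) (hi : 0 ≤ i) :
    (pvA_getwin direction window mask i).any id
      = pvB_nonempty direction window (PySem.List.len mask) (pvB_prefix mask) i := by
  have hlim : pvA_limits direction window mask i = pvB_limits direction window (PySem.List.len mask) i := rfl
  have hlen : PySem.List.len mask = (mask.length : Int) := PySem.List.len_eq mask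
  have ha : 0 ≤ (pvA_limits direction window mask i).1 := by
    unfold pvA_limits; split_ifs <;> simp <;> omega
  have hb : 0 ≤ (pvA_limits direction window mask i).2 := by
    unfold pvA_limits
    split_ifs with h
    · simp only
      rw [hlen]
      have := hw h
      omega
    · simp only
      omega
  unfold pvB_nonempty
  rw [← hlim]
  exact pv_key mask _ _ ha hb

theorem pv_edge_eq (direction : Int) (mask : List Bool) (i : Int) :
    pvA_edge direction mask i
      = (i == (if direction > 0 then PySem.List.len mask - 1 else 0)) := by
  unfold pvA_edge
  split_ifs <;> rfl

theorem pv_loop_eq (direction window : Int) (mask : List Bool)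
    (hd : direction ≠ 0) (hw : 0 < direction → 0 ≤ window) : ∀ (fuel : Nat) (i : Int), 0 ≤ i →
    pvA_loop direction window mask fuel i
      = pvB_loop direction window (PySem.List.len mask) (pvB_prefix mask)
          (if direction > 0 then PySem.List.len mask - 1 else 0)
          (if direction > 0 then 1 else -1) fuel i := by
  intro fuel
  induction fuel with
  | zero => intro i _; rfl
  | succ f ih =>
    intro i hi
    have hstep : (if direction ≥ 0 then (1 : Int) else -1) = (if direction > 0 then (1 : Int) else -1) := by
      split_ifs <;> omega
    simp only [pvA_loop, pvB_loop, pv_test_eq direction window mask i hw hi, pv_edge_eq, hstep]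
    by_cases h : (pvB_nonempty direction window (PySem.List.len mask) (pvB_prefix mask) i
        && !(i == (if direction > 0 then PySem.List.len mask - 1 else 0))) = true
    · rw [if_pos h, if_pos h]
      have hnext : 0 ≤ i + (if direction > 0 then (1 : Int) else -1) := by
        have hne := (Bool.and_eq_true _ _ |>.mp h).2
        by_cases hpos : direction > 0
        · rw [if_pos hpos]; omega
        · rw [if_neg hpos]
          rw [if_neg hpos] at hne
          have : i ≠ 0 := by simpa using hne
          omega
      exact ih _ hnext
    · rw [if_neg h, if_neg h]

-- ===== VERDICT (by name: the statement is the Claim_ definition above) =====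
theorem find_adjasent_interval_spec : Claim_equal_find_adjasent_interval := by
  intro direction window mask istart _ hpre
  obtain ⟨hd, hi, hw⟩ := hpre
  unfold Spec_find_adjasent_interval
  simp only [find_adjasent_interval, find_adjasent_interval_alt]
  rw [pv_loop_eq direction window mask hd hw _ istart hi]
  rfl
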